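-- pv_equiv track=rewrite | github.com/charlie9578/adventofcode2022 | Day20.py | quick_wrap
-- ===== SOURCE A (Python) =====
-- def quick_wrap(loc_new,sequence):
--     # take account of wrapping
--     if loc_new<0:
--         loc_new = loc_new%len(sequence)+loc_new//len(sequence)
--         return quick_wrap(loc_new,sequence)
--     elif loc_new>len(sequence):
--         loc_new = loc_new%len(sequence)+loc_new//len(sequence)
--         return quick_wrap(loc_new,sequence)
--     elif loc_new==len(sequence):
--         loc_new = 1
--         return loc_new
--     else:
--         return loc_new
-- ===== SOURCE B (Python) =====
-- def quick_wrap(loc_new, sequence):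
--     # closed form: the result is the representative of loc_new modulo len(sequence)-1,
--     # taken in [0, n-2] for loc_new <= 0 and in [1, n-1] for loc_new > 0
--     n = len(sequence)
--     if loc_new <= 0:
--         return loc_new % (n - 1)
--     return (loc_new - 1) % (n - 1) + 1
-- ===== Notes on version B (the rewrite author's own statement) =====
-- stated objective: simpler
-- what changed: Replaced A's repeated 'loc%n + loc//n' recursion with a single closed-form modulus: the result is loc_new's representative modulo len(sequence)-1, in [0,n-2] for loc_new<=0 and in [1,n-1] for loc_new>0.
-- outside the precondition, e.g. on quick_wrap(0, []): A returns 1, B returns 0; on quick_wrap(0, [7]): A returns 0, B raises ZeroDivisionError; on quick_wrap(1, [7]): A returns 1, B raises ZeroDivisionError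
import Mathlib
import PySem

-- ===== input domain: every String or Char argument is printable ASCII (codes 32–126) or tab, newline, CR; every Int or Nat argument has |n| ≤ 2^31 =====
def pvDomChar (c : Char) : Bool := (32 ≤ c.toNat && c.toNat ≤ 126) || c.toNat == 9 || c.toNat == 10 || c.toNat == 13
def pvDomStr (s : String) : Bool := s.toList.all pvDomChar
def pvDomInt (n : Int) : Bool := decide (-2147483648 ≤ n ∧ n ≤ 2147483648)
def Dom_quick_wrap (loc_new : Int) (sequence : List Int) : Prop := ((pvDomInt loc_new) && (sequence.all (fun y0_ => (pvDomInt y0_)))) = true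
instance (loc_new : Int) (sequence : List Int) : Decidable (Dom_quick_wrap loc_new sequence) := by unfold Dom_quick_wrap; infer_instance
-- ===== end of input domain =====

-- B replaces A's step-by-step recursive re-wrapping with a single closed-form modulus by len(sequence)-1 (objective: simpler).

-- ===== PORT A =====
-- A's recursion is ported with a fuel parameter (totality guard only); under
-- Pre_ (length ≥ 2) the fuel natAbs loc_new + 2 is proved sufficient below.
def quickWrapAux : Nat → Int → List Int → Int
  | 0, loc_new, _ => loc_new   -- fuel exhausted; never reached under Pre_
  | fuel + 1, loc_new, sequence =>
    if loc_new < 0 then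
      quickWrapAux fuel
        (PySem.Int.mod loc_new (sequence.length : Int)
          + PySem.Int.floordiv loc_new (sequence.length : Int)) sequence
    else if loc_new > (sequence.length : Int) then
      quickWrapAux fuel
        (PySem.Int.mod loc_new (sequence.length : Int)
          + PySem.Int.floordiv loc_new (sequence.length : Int)) sequence
    else if loc_new = (sequence.length : Int) then 1
    else loc_new

def quick_wrap (loc_new : Int) (sequence : List Int) : Int :=
  quickWrapAux (loc_new.natAbs + 2) loc_new sequence

-- ===== PORT B =====
def quick_wrap_alt (loc_new : Int) (sequence : List Int) : Int :=
  if loc_new ≤ 0 then PySem.Int.mod loc_new ((sequence.length : Int) - 1)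
  else PySem.Int.mod (loc_new - 1) ((sequence.length : Int) - 1) + 1

-- ===== PRECONDITION & SPEC =====
-- Pre_ excludes sequences of length < 2: there A either fails to return
-- (ZeroDivisionError / unbounded recursion for almost every loc_new) or, at the
-- few degenerate fixed points (loc_new=0 with [], loc_new∈{0,1} with one element),
-- returns accidental values of an undefined wrap, while B's modulus by
-- len(sequence)-1 is undefined (raises) or differs there.
def Pre_quick_wrap (loc_new : Int) (sequence : List Int) : Prop := 2 ≤ sequence.length
instance (loc_new : Int) (sequence : List Int) : Decidable (Pre_quick_wrap loc_new sequence) := by unfold Pre_quick_wrap; infer_instance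
def pvWitness_quick_wrap : Int × List Int := (7, [10, 20, 30])

def Spec_quick_wrap (loc_new : Int) (sequence : List Int) (out : Int) : Prop := out = quick_wrap_alt loc_new sequence
instance (loc_new : Int) (sequence : List Int) (out : Int) : Decidable (Spec_quick_wrap loc_new sequence out) := by unfold Spec_quick_wrap; infer_instance

-- ===== CLAIM (what is proved, stated in full; the proofs are below) =====
def Claim_equal_quick_wrap : Prop := ∀ (loc_new : Int) (sequence : List Int), Dom_quick_wrap loc_new sequence → Pre_quick_wrap loc_new sequence → Spec_quick_wrap loc_new sequence (quick_wrap loc_new sequence)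

-- ===== LEMMAS AND PROOFS =====

-- Closed form of B over emod, as a function of loc and n = length.
def pvCf (loc n : Int) : Int :=
  if loc ≤ 0 then loc % (n - 1) else (loc - 1) % (n - 1) + 1

theorem pvAlt_eq_cf (loc : Int) (seq : List Int) (hn : 2 ≤ (seq.length : Int)) :
    quick_wrap_alt loc seq = pvCf loc (seq.length : Int) := by
  unfold quick_wrap_alt pvCf
  rw [PySem.Int.mod_eq_emod_of_pos (by omega : (0:Int) < (seq.length : Int) - 1),
      PySem.Int.mod_eq_emod_of_pos (by omega : (0:Int) < (seq.length : Int) - 1)]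

-- base case: 0 ≤ loc ≤ n gives A's terminal value = closed form
theorem pvCf_base (loc n : Int) (hn : 2 ≤ n) (h0 : 0 ≤ loc) (h1 : loc ≤ n) :
    (if loc = n then (1 : Int) else loc) = pvCf loc n := by
  unfold pvCf
  by_cases he : loc = n
  · rw [if_pos he, he, if_neg (by omega : ¬ n ≤ 0), Int.emod_self]
    norm_num
  · rw [if_neg he]
    by_cases hz : loc ≤ 0
    · have h00 : loc = 0 := by omega
      rw [if_pos hz, h00, Int.zero_emod]
    · rw [if_neg hz, Int.emod_eq_of_lt (by omega) (by omega)]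
      omega

-- the step loc % n + loc / n preserves the closed form, and its bounds
theorem pvCf_step (loc n : Int) (hn : 2 ≤ n) (h : loc < 0 ∨ n < loc) :
    pvCf (loc % n + loc / n) n = pvCf loc n
    ∧ (loc < 0 → loc < loc % n + loc / n ∧ loc % n + loc / n ≤ n - 2)
    ∧ (n < loc → 1 ≤ loc % n + loc / n ∧ loc % n + loc / n < loc) := by
  have hr0 : 0 ≤ loc % n := Int.emod_nonneg loc (by omega)
  have hrn : loc % n < n := Int.emod_lt_of_pos loc (by omega)
  have hqr : n * (loc / n) + loc % n = loc := Int.ediv_add_emod loc n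
  generalize hqd : loc / n = q at *
  generalize hrd : loc % n = r at *
  have key : loc - (r + q) = q * (n - 1) := by rw [← hqr]; ring
  have hcong : ∀ a b : Int, a - b = q * (n - 1) → a % (n - 1) = b % (n - 1) := by
    intro a b hab
    rw [Int.emod_eq_emod_iff_emod_sub_eq_zero, hab, Int.mul_emod_left]
  rcases h with hneg | hpos
  · -- loc < 0 : q ≤ -1
    have hq1 : q ≤ -1 := by
      by_contra hc
      have h0q : (0:Int) ≤ q := by omega
      have : (0:Int) ≤ n * q := mul_nonneg (by omega) h0q
      linarith
    have hub : r + q ≤ n - 2 := by omega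
    have hlt : loc < r + q := by nlinarith [key]
    refine ⟨?_, fun _ => ⟨hlt, hub⟩, fun hc => absurd hc (by omega)⟩
    unfold pvCf
    rw [if_pos (by omega : loc ≤ 0)]
    by_cases hs : r + q ≤ 0
    · rw [if_pos hs]
      exact (hcong loc (r + q) key).symm
    · rw [if_neg hs]
      have h2 : loc % (n - 1) = (r + q) % (n - 1) := hcong loc (r + q) key
      have h3 : (r + q) % (n - 1) = r + q := Int.emod_eq_of_lt (by omega) (by omega)
      have h4 : (r + q - 1) % (n - 1) = r + q - 1 :=
        Int.emod_eq_of_lt (by omega) (by omega)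
      rw [h2, h3, h4]
      omega
  · -- n < loc : q ≥ 1
    have hq1 : 1 ≤ q := by
      by_contra hc
      have h0q : q ≤ 0 := by omega
      have : n * q ≤ 0 := mul_nonpos_of_nonneg_of_nonpos (by omega) h0q
      linarith
    have hlt : r + q < loc := by nlinarith [key]
    refine ⟨?_, fun hc => absurd hc (by omega), fun _ => ⟨by omega, hlt⟩⟩
    unfold pvCf
    rw [if_neg (by omega : ¬ loc ≤ 0), if_neg (by omega : ¬ r + q ≤ 0)]
    have h5 : (loc - 1) % (n - 1) = (r + q - 1) % (n - 1) :=
      hcong (loc - 1) (r + q - 1) (by linarith [key])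
    rw [h5]

-- main induction: with enough fuel, A's recursion computes the closed form
theorem pvAux_eq (fuel : Nat) :
    ∀ (loc : Int) (seq : List Int), 2 ≤ seq.length → loc.natAbs + 2 ≤ fuel →
      quickWrapAux fuel loc seq = quick_wrap_alt loc seq := by
  induction fuel with
  | zero => intro loc seq _ hf; omega
  | succ f ih =>
    intro loc seq hlen hf
    have hn : 2 ≤ (seq.length : Int) := by exact_mod_cast hlen
    rw [pvAlt_eq_cf loc seq hn]
    simp only [quickWrapAux]
    rw [PySem.Int.mod_eq_emod_of_pos (by omega : (0:Int) < (seq.length : Int)),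
        PySem.Int.floordiv_eq_ediv_of_pos (by omega : (0:Int) < (seq.length : Int))]
    by_cases h1 : loc < 0
    · rw [if_pos h1]
      obtain ⟨hcf, hb, -⟩ := pvCf_step loc (seq.length : Int) hn (Or.inl h1)
      obtain ⟨hlt, hub⟩ := hb h1
      generalize hgen : loc % (seq.length : Int) + loc / (seq.length : Int) = s
        at hcf hlt hub ⊢
      by_cases hs2 : s < 0
      · -- s still negative, strictly closer to 0
        rw [ih s seq hlen (by omega), pvAlt_eq_cf s seq hn, hcf]
      · -- s lands in [0, n-2]: one more unfolding terminates
        obtain ⟨f', rfl⟩ : ∃ f', f = f' + 1 := ⟨f - 1, by omega⟩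
        simp only [quickWrapAux]
        rw [if_neg hs2, if_neg (by omega : ¬ s > (seq.length : Int)),
            if_neg (by omega : ¬ s = (seq.length : Int)), ← hcf]
        unfold pvCf
        by_cases hz : s ≤ 0
        · have h00 : s = 0 := by omega
          rw [if_pos hz, h00, Int.zero_emod]
        · rw [if_neg hz, Int.emod_eq_of_lt (by omega) (by omega)]
          omega
    · rw [if_neg h1]
      by_cases h2 : loc > (seq.length : Int)
      · rw [if_pos h2]
        obtain ⟨hcf, -, hb⟩ := pvCf_step loc (seq.length : Int) hn (Or.inr h2)
        obtain ⟨hlb, hlt⟩ := hb h2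
        generalize hgen : loc % (seq.length : Int) + loc / (seq.length : Int) = s
          at hcf hlb hlt ⊢
        rw [ih s seq hlen (by omega), pvAlt_eq_cf s seq hn, hcf]
      · rw [if_neg h2]
        exact pvCf_base loc (seq.length : Int) hn (by omega) (by omega)

-- ===== VERDICT (by name: the statement is the Claim_ definition above) =====
theorem quick_wrap_spec : Claim_equal_quick_wrap := by
  intro loc_new sequence _ hpre
  unfold Spec_quick_wrap quick_wrap
  exact pvAux_eq (loc_new.natAbs + 2) loc_new sequence hpre (by omega)
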